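-- pv_equiv track=rewrite | github.com/OscarMaestre/generadorejerciciosxml | ElementoXML.py | reemplazar_xsd
-- ===== SOURCE A (Python) =====
-- def reemplazar_xsd(cadena):
--     reemplazos=[ ("<complexType", "<xsd:complexType"), ("</complexType>", "</xsd:complexType>"),
--                  ("<simpleType", "<xsd:simpleType"), ("</simpleType>", "</xsd:simpleType>"),
--                  ("<complexContent>", "<xsd:complexContent>"), ("</complexContent>", "</xsd:complexContent>"),
--                  ("<simpleContent>", "<xsd:simpleContent>"), ("</simpleContent>", "</xsd:simpleContent>"),
--                  ("<attribute", "<xsd:attribute"),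
--                  ("<extension", "<xsd:extension"), ("</extension>", "</xsd:extension>"),
--                  ("<restriction", "<xsd:restriction"), ("</restriction>", "</xsd:restriction>"),
--                  ("<enumeration", "<xsd:enumeration"), ("</enumeration>", "</xsd:enumeration>"),
--                  ("<fractionDigits", "<xsd:fractionDigits"), ("</fractionDigits>", "</xsd:fractionDigits>"),
--                  ("<totalDigits", "<xsd:totalDigits"), ("</totalDigits>", "</xsd:totalDigits>"),
--                  ("<minInclusive", "<xsd:minInclusive"), ("</minInclusive>", "</xsd:minInclusive>"),
--                  ("<maxInclusive", "<xsd:maxInclusive"), ("</maxInclusive>", "</xsd:maxInclusive>"),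
--                  ("<pattern", "<xsd:pattern"), ("</pattern>", "</xsd:pattern>"),
--
--
--                  ]
--
--     for r in reemplazos:
--         cadena=cadena.replace(r[0], r[1])
--     return cadena
-- ===== SOURCE B (Python) =====
-- def reemplazar_xsd(cadena):
--     # Single left-to-right scan consulting the replacement table at each
--     # position, instead of 26 sequential full-string replace passes.
--     reemplazos=[ ("<complexType", "<xsd:complexType"), ("</complexType>", "</xsd:complexType>"),
--                  ("<simpleType", "<xsd:simpleType"), ("</simpleType>", "</xsd:simpleType>"),
--                  ("<complexContent>", "<xsd:complexContent>"), ("</complexContent>", "</xsd:complexContent>"),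
--                  ("<simpleContent>", "<xsd:simpleContent>"), ("</simpleContent>", "</xsd:simpleContent>"),
--                  ("<attribute", "<xsd:attribute"),
--                  ("<extension", "<xsd:extension"), ("</extension>", "</xsd:extension>"),
--                  ("<restriction", "<xsd:restriction"), ("</restriction>", "</xsd:restriction>"),
--                  ("<enumeration", "<xsd:enumeration"), ("</enumeration>", "</xsd:enumeration>"),
--                  ("<fractionDigits", "<xsd:fractionDigits"), ("</fractionDigits>", "</xsd:fractionDigits>"),
--                  ("<totalDigits", "<xsd:totalDigits"), ("</totalDigits>", "</xsd:totalDigits>"),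
--                  ("<minInclusive", "<xsd:minInclusive"), ("</minInclusive>", "</xsd:minInclusive>"),
--                  ("<maxInclusive", "<xsd:maxInclusive"), ("</maxInclusive>", "</xsd:maxInclusive>"),
--                  ("<pattern", "<xsd:pattern"), ("</pattern>", "</xsd:pattern>"),
--                  ]
--     partes = []
--     i = 0
--     n = len(cadena)
--     while i < n:
--         for viejo, nuevo in reemplazos:
--             if cadena.startswith(viejo, i):
--                 partes.append(nuevo)
--                 i += len(viejo)
--                 break
--         else:
--             partes.append(cadena[i])
--             i += 1
--     return "".join(partes)
-- ===== Notes on version B (the rewrite author's own statement) =====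
-- stated objective: alternative
-- what changed: A makes 26 sequential full-string replace passes (one per table pair); B makes a single left-to-right scan over the string, consulting the replacement table at each position, emitting the replacement and jumping over the matched key or copying one character.
import Mathlib
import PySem

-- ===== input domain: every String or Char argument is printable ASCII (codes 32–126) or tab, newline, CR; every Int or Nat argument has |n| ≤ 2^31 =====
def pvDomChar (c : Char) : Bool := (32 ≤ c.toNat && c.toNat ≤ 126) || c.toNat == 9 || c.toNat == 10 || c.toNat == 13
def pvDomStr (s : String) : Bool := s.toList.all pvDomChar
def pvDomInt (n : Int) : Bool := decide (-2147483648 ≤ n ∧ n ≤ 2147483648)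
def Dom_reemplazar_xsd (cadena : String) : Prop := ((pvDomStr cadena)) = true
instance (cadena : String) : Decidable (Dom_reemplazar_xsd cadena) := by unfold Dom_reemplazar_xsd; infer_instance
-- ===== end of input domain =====

-- B replaces A's 26 sequential full-string replace passes by ONE left-to-right scan that
-- consults the same replacement table at each position (objective: alternative; not measured faster).

-- ===== PORT A =====
def reemplazar_xsd (cadena : String) : String :=
  let reemplazos : List (String × String) :=
    [ ("<complexType", "<xsd:complexType"), ("</complexType>", "</xsd:complexType>"),
      ("<simpleType", "<xsd:simpleType"), ("</simpleType>", "</xsd:simpleType>"),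
      ("<complexContent>", "<xsd:complexContent>"), ("</complexContent>", "</xsd:complexContent>"),
      ("<simpleContent>", "<xsd:simpleContent>"), ("</simpleContent>", "</xsd:simpleContent>"),
      ("<attribute", "<xsd:attribute"),
      ("<extension", "<xsd:extension"), ("</extension>", "</xsd:extension>"),
      ("<restriction", "<xsd:restriction"), ("</restriction>", "</xsd:restriction>"),
      ("<enumeration", "<xsd:enumeration"), ("</enumeration>", "</xsd:enumeration>"),
      ("<fractionDigits", "<xsd:fractionDigits"), ("</fractionDigits>", "</xsd:fractionDigits>"),
      ("<totalDigits", "<xsd:totalDigits"), ("</totalDigits>", "</xsd:totalDigits>"),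
      ("<minInclusive", "<xsd:minInclusive"), ("</minInclusive>", "</xsd:minInclusive>"),
      ("<maxInclusive", "<xsd:maxInclusive"), ("</maxInclusive>", "</xsd:maxInclusive>"),
      ("<pattern", "<xsd:pattern"), ("</pattern>", "</xsd:pattern>") ]
  reemplazos.foldl (fun cadena r => PySem.Str.replace cadena r.1 r.2) cadena

-- ===== PORT B =====
-- B's table: the same 26 pairs (Source B re-declares them)
def pvTabla : List (String × String) :=
  [ ("<complexType", "<xsd:complexType"), ("</complexType>", "</xsd:complexType>"),
    ("<simpleType", "<xsd:simpleType"), ("</simpleType>", "</xsd:simpleType>"),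
    ("<complexContent>", "<xsd:complexContent>"), ("</complexContent>", "</xsd:complexContent>"),
    ("<simpleContent>", "<xsd:simpleContent>"), ("</simpleContent>", "</xsd:simpleContent>"),
    ("<attribute", "<xsd:attribute"),
    ("<extension", "<xsd:extension"), ("</extension>", "</xsd:extension>"),
    ("<restriction", "<xsd:restriction"), ("</restriction>", "</xsd:restriction>"),
    ("<enumeration", "<xsd:enumeration"), ("</enumeration>", "</xsd:enumeration>"),
    ("<fractionDigits", "<xsd:fractionDigits"), ("</fractionDigits>", "</xsd:fractionDigits>"),
    ("<totalDigits", "<xsd:totalDigits"), ("</totalDigits>", "</xsd:totalDigits>"),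
    ("<minInclusive", "<xsd:minInclusive"), ("</minInclusive>", "</xsd:minInclusive>"),
    ("<maxInclusive", "<xsd:maxInclusive"), ("</maxInclusive>", "</xsd:maxInclusive>"),
    ("<pattern", "<xsd:pattern"), ("</pattern>", "</xsd:pattern>") ]

-- the table on the character level (Source B works position-wise on the string)
def pvCTab : List (List Char × List Char) := pvTabla.map (fun p => (p.1.toList, p.2.toList))

-- inner `for … else` of Source B: first table entry whose key starts at the current position
def pvFindRule (tbl : List (List Char × List Char)) (l : List Char) : Option (List Char × List Char) :=
  match tbl with
  | [] => none
  | p :: ps => if p.1.isPrefixOf l then some p else pvFindRule ps l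

-- the `while i < n` scan of Source B: emit the replacement and jump over the key, or copy one char
def pvScan (tbl : List (List Char × List Char)) : List Char → List Char
  | [] => []
  | c :: t =>
    match pvFindRule tbl (c :: t) with
    | some p => p.2 ++ pvScan tbl (t.drop (p.1.length - 1))
    | none => c :: pvScan tbl t
termination_by l => l.length
decreasing_by
  · simp only [List.length_drop, List.length_cons]; omega
  · simp only [List.length_cons]; omega

def reemplazar_xsd_alt (cadena : String) : String :=
  String.ofList (pvScan pvCTab cadena.toList)

-- ===== PRECONDITION & SPEC =====
def Spec_reemplazar_xsd (cadena : String) (out : String) : Prop := out = reemplazar_xsd_alt cadena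
instance (cadena : String) (out : String) : Decidable (Spec_reemplazar_xsd cadena out) := by unfold Spec_reemplazar_xsd; infer_instance

-- ===== CLAIM (what is proved, stated in full; the proofs are below) =====
def Claim_equal_reemplazar_xsd : Prop := ∀ (cadena : String), Dom_reemplazar_xsd cadena → Spec_reemplazar_xsd cadena (reemplazar_xsd cadena)

-- ===== LEMMAS AND PROOFS =====

-- a single replace pass (Python's s.replace(k, v)), as a structural recursion on the list
def pvRep (k v : List Char) : List Char → List Char
  | [] => []
  | c :: t => if k.isPrefixOf (c :: t) then v ++ pvRep k v (t.drop (k.length - 1)) else c :: pvRep k v t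
termination_by l => l.length
decreasing_by
  · simp only [List.length_drop, List.length_cons]; omega
  · simp only [List.length_cons]; omega

-- shape facts about the table, checked by `decide` on the literal
def pvKeyShape (u : List Char) : Bool :=
  match u with
  | c :: w => c == '<' && !w.contains '<'
  | [] => false

def pvIncompat (a b : List Char) : Bool := (a.zip b).any (fun q => q.1 != q.2)

def pvGood : List (List Char × List Char) → Bool
  | [] => true
  | p :: tbl => pvKeyShape p.1 && pvKeyShape p.2
      && tbl.all (fun q => pvIncompat (q.1.drop 1) (p.2.drop 1)) && pvGood tbl

theorem pvGood_pvCTab : pvGood pvCTab = true := by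
  decide

theorem incompat_not_prefix (a b X : List Char) (h : pvIncompat a b = true) :
    ¬ a <+: b ++ X := by
  intro hp
  induction a generalizing b X with
  | nil => simp [pvIncompat] at h
  | cons x a ih =>
    cases b with
    | nil => simp [pvIncompat] at h
    | cons y b =>
      rcases (List.cons_prefix_cons.mp (by simpa using hp)) with ⟨hxy, hp'⟩
      simp only [pvIncompat, List.zip_cons_cons, List.any_cons, Bool.or_eq_true] at h
      rcases h with h | h
      · simp [hxy] at h
      · exact ih b X h hp'

theorem prefix_ltfree (w A B : List Char) (hw : '<' ∉ w) :
    w <+: A ++ '<' :: B ↔ w <+: A := by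
  induction w generalizing A with
  | nil => simp
  | cons x w ih =>
    cases A with
    | nil =>
      simp only [List.nil_append]
      constructor
      · intro hp
        rcases List.cons_prefix_cons.mp hp with ⟨hx, _⟩
        exact absurd (hx ▸ List.mem_cons_self ..) hw
      · intro hp; exact absurd (List.prefix_nil.mp hp) (by simp)
    | cons a A =>
      simp only [List.cons_append, List.cons_prefix_cons]
      constructor
      · rintro ⟨hx, hp⟩; exact ⟨hx, (ih A (by simp_all)).mp hp⟩
      · rintro ⟨hx, hp⟩; exact ⟨hx, (ih A (by simp_all)).mpr hp⟩

theorem keyShape_shape (u : List Char) (h : pvKeyShape u = true) :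
    ∃ w, u = '<' :: w ∧ '<' ∉ w := by
  cases u with
  | nil => simp [pvKeyShape] at h
  | cons c w =>
    simp only [pvKeyShape, Bool.and_eq_true, beq_iff_eq, Bool.not_eq_eq_eq_not, Bool.not_true] at h
    exact ⟨w, by rw [h.1], by simpa using h.2⟩

theorem prefix_lt_cons (w B : List Char) (hw : '<' ∉ w) : w <+: '<' :: B ↔ w = [] := by
  simpa using prefix_ltfree w [] B hw

theorem rep_prefix_iff_aux (k v : List Char) (hk : pvKeyShape k = true) (hv : pvKeyShape v = true) :
    ∀ (n : Nat) (s w : List Char), s.length ≤ n → '<' ∉ w → (w <+: pvRep k v s ↔ w <+: s) := by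
  obtain ⟨wk, hk1, hk2⟩ := keyShape_shape k hk
  obtain ⟨wv, hv1, hv2⟩ := keyShape_shape v hv
  intro n
  induction n with
  | zero =>
    intro s w hs hw
    have : s = [] := by cases s <;> simp_all
    subst this
    rw [pvRep]
  | succ n ih =>
    intro s w hs hw
    cases s with
    | nil => rw [pvRep]
    | cons c t =>
      by_cases hp : k.isPrefixOf (c :: t) = true
      · rw [pvRep]
        simp only [hp, if_true]
        have hc : c = '<' := by
          rw [hk1] at hp
          simpa [List.isPrefixOf] using (List.cons_prefix_cons.mp (List.isPrefixOf_iff_prefix.mp hp)).1.symm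
        subst hc
        rw [hv1]
        rw [List.cons_append, prefix_lt_cons w _ hw, prefix_lt_cons w _ hw]
      · rw [pvRep, if_neg hp]
        cases w with
        | nil => simp
        | cons x w' =>
          simp only [List.cons_prefix_cons]
          constructor
          · rintro ⟨hx, hpre⟩
            exact ⟨hx, (ih t w' (by simpa using Nat.le_of_succ_le_succ hs) (by simp_all)).mp hpre⟩
          · rintro ⟨hx, hpre⟩
            exact ⟨hx, (ih t w' (by simpa using Nat.le_of_succ_le_succ hs) (by simp_all)).mpr hpre⟩

theorem rep_ltfree_append (k v u X : List Char) (hk : pvKeyShape k = true) (hu : '<' ∉ u) :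
    pvRep k v (u ++ X) = u ++ pvRep k v X := by
  obtain ⟨wk, hk1, hk2⟩ := keyShape_shape k hk
  induction u with
  | nil => simp
  | cons c u ih =>
    have hc : c ≠ '<' := fun h => hu (h ▸ List.mem_cons_self ..)
    have hpre : k.isPrefixOf (c :: (u ++ X)) = false := by
      rw [hk1]
      simp [List.isPrefixOf, Ne.symm hc]
    rw [List.cons_append, pvRep]
    simp only [hpre, Bool.false_eq_true, if_false]
    rw [ih (fun h => hu (List.mem_cons_of_mem _ h))]
    simp

theorem findRule_none_of_false (tbl : List (List Char × List Char)) (l : List Char)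
    (h : ∀ q ∈ tbl, q.1.isPrefixOf l = false) : pvFindRule tbl l = none := by
  induction tbl with
  | nil => rfl
  | cons p ps ih =>
    simp only [pvFindRule, h p (by simp), Bool.false_eq_true, if_false]
    exact ih fun q hq => h q (by simp [hq])

theorem findRule_congr (tbl : List (List Char × List Char)) (l l' : List Char)
    (h : ∀ q ∈ tbl, q.1.isPrefixOf l = q.1.isPrefixOf l') : pvFindRule tbl l = pvFindRule tbl l' := by
  induction tbl with
  | nil => rfl
  | cons p ps ih =>
    simp only [pvFindRule, h p (by simp)]
    split
    · rfl
    · exact ih fun q hq => h q (by simp [hq])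

theorem findRule_some (tbl : List (List Char × List Char)) (l : List Char) (q : List Char × List Char)
    (h : pvFindRule tbl l = some q) : q ∈ tbl ∧ q.1.isPrefixOf l = true := by
  induction tbl with
  | nil => simp [pvFindRule] at h
  | cons p ps ih =>
    simp only [pvFindRule] at h
    by_cases hp : p.1.isPrefixOf l = true
    · simp only [hp, if_true, Option.some_inj] at h
      exact ⟨by simp [← h], h ▸ hp⟩
    · simp only [hp] at h
      rcases ih (by simpa [hp] using h) with ⟨h1, h2⟩
      exact ⟨by simp [h1], h2⟩

theorem good_keys (tbl : List (List Char × List Char)) (h : pvGood tbl = true) :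
    ∀ q ∈ tbl, pvKeyShape q.1 = true := by
  induction tbl with
  | nil => simp
  | cons p ps ih =>
    simp only [pvGood, Bool.and_eq_true] at h
    intro q hq
    rcases List.mem_cons.mp hq with hq | hq
    · simpa [hq] using h.1.1.1
    · exact ih h.2 q hq

theorem scan_nil_table (s : List Char) : pvScan [] s = s := by
  induction s with
  | nil => rw [pvScan]
  | cons c t ih => rw [pvScan]; simp [pvFindRule, ih]

theorem scan_ltfree (tbl : List (List Char × List Char)) (u X : List Char)
    (hkeys : ∀ q ∈ tbl, pvKeyShape q.1 = true) (hu : '<' ∉ u) :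
    pvScan tbl (u ++ X) = u ++ pvScan tbl X := by
  induction u with
  | nil => simp
  | cons c u ih =>
    have hc : c ≠ '<' := fun h => hu (h ▸ List.mem_cons_self ..)
    rw [List.cons_append, pvScan]
    have hnone : pvFindRule tbl (c :: (u ++ X)) = none := by
      apply findRule_none_of_false
      intro q hq
      obtain ⟨wq, hq1, _⟩ := keyShape_shape q.1 (hkeys q hq)
      rw [hq1]
      simp [List.isPrefixOf, Ne.symm hc]
    rw [hnone]
    rw [ih (fun h => hu (List.mem_cons_of_mem _ h))]
    simp

theorem scan_cons_some (tbl : List (List Char × List Char)) (c : Char) (t : List Char)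
    (q : List Char × List Char) (h : pvFindRule tbl (c :: t) = some q) :
    pvScan tbl (c :: t) = q.2 ++ pvScan tbl (t.drop (q.1.length - 1)) := by
  rw [pvScan, h]

theorem scan_cons_none (tbl : List (List Char × List Char)) (c : Char) (t : List Char)
    (h : pvFindRule tbl (c :: t) = none) :
    pvScan tbl (c :: t) = c :: pvScan tbl t := by
  rw [pvScan, h]

theorem scan_rep_aux (p : List Char × List Char) (tbl : List (List Char × List Char))
    (hg : pvGood (p :: tbl) = true) :
    ∀ (n : Nat) (s : List Char), s.length ≤ n →
      pvScan tbl (pvRep p.1 p.2 s) = pvScan (p :: tbl) s := by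
  simp only [pvGood, Bool.and_eq_true, List.all_eq_true] at hg
  obtain ⟨⟨⟨hk, hv⟩, hall⟩, hrest⟩ := hg
  have hkeys := good_keys tbl hrest
  obtain ⟨wk, hk1, hk2⟩ := keyShape_shape p.1 hk
  obtain ⟨wv, hv1, hv2⟩ := keyShape_shape p.2 hv
  intro n
  induction n with
  | zero =>
    intro s hs
    have : s = [] := by cases s <;> simp_all
    subst this
    rw [pvRep, pvScan, pvScan]
  | succ n ih =>
    intro s hs
    cases s with
    | nil => rw [pvRep, pvScan, pvScan]
    | cons c t =>
      have ht : t.length ≤ n := by simpa using Nat.le_of_succ_le_succ hs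
      by_cases hp : p.1.isPrefixOf (c :: t) = true
      · -- replacement fires at this position in both programs
        have hc : c = '<' := by
          rw [hk1] at hp
          simpa [List.isPrefixOf] using (List.cons_prefix_cons.mp (List.isPrefixOf_iff_prefix.mp hp)).1.symm
        subst hc
        have hfp : pvFindRule (p :: tbl) ('<' :: t) = some p := by
          rw [pvFindRule]; simp [hp]
        rw [scan_cons_some _ _ _ _ hfp]
        rw [pvRep, if_pos hp]
        have hnone : pvFindRule tbl (p.2 ++ pvRep p.1 p.2 (t.drop (p.1.length - 1))) = none := by
          apply findRule_none_of_false
          intro q hq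
          obtain ⟨wq, hq1, _⟩ := keyShape_shape q.1 (hkeys q hq)
          have hinc : pvIncompat (q.1.drop 1) (p.2.drop 1) = true := hall q hq
          rw [hq1, hv1] at hinc
          simp only [List.drop_one, List.tail_cons] at hinc
          have hnp := incompat_not_prefix wq wv (pvRep p.1 p.2 (t.drop (p.1.length - 1))) hinc
          rw [hv1] at hnp
          have hfalse : wq.isPrefixOf (wv ++ pvRep p.1 ('<' :: wv) (List.drop (p.1.length - 1) t)) = false := by
            simp only [← List.isPrefixOf_iff_prefix] at hnp
            exact Bool.not_eq_true _ ▸ (by simpa using hnp)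
          rw [hq1, hv1, List.cons_append]
          simp [List.isPrefixOf, hfalse]
        conv_lhs => rw [hv1, List.cons_append]
        rw [hv1] at hnone
        rw [scan_cons_none _ _ _ (by simpa using hnone)]
        rw [scan_ltfree tbl wv _ hkeys hv2]
        rw [← hv1, ih (t.drop (p.1.length - 1)) (le_trans (by simp [List.length_drop]) ht)]
        simp [hv1]
      · -- no replacement fires at this position: both scans copy one character (or the
        -- first matching rule lies in tbl and matches the same key in both strings)
        rw [pvRep, if_neg hp]
        have hcong : pvFindRule tbl (c :: pvRep p.1 p.2 t) = pvFindRule tbl (c :: t) := by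
          apply findRule_congr
          intro q hq
          obtain ⟨wq, hq1, hwq⟩ := keyShape_shape q.1 (hkeys q hq)
          by_cases hc : c = '<'
          · subst hc
            rw [hq1]
            simp only [List.isPrefixOf, beq_self_eq_true, Bool.true_and]
            rw [Bool.eq_iff_iff]
            simpa [List.isPrefixOf_iff_prefix] using
              rep_prefix_iff_aux p.1 p.2 hk hv t.length t wq le_rfl hwq
          · rw [hq1]
            simp only [List.isPrefixOf]
            rw [beq_eq_false_iff_ne.mpr (Ne.symm hc)]
            simp
        have hhead : pvFindRule (p :: tbl) (c :: t) = pvFindRule tbl (c :: t) := by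
          rw [pvFindRule, if_neg hp]
        cases hfr : pvFindRule tbl (c :: t) with
        | none =>
          rw [scan_cons_none _ _ _ (hcong.trans hfr), scan_cons_none _ _ _ (hhead.trans hfr)]
          rw [ih t ht]
        | some q =>
          obtain ⟨hqmem, hqpre⟩ := findRule_some tbl _ q hfr
          obtain ⟨wq, hq1, hwq⟩ := keyShape_shape q.1 (hkeys q hqmem)
          have hpre' := List.isPrefixOf_iff_prefix.mp hqpre
          rw [hq1] at hpre'
          obtain ⟨hc, hwqt⟩ := List.cons_prefix_cons.mp hpre'
          obtain ⟨T, hT⟩ := hwqt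
          rw [scan_cons_some _ _ _ _ (hcong.trans hfr), scan_cons_some _ _ _ _ (hhead.trans hfr)]
          rw [hq1]
          simp only [List.length_cons, Nat.add_sub_cancel]
          rw [← hT]
          rw [rep_ltfree_append p.1 p.2 wq T hk hwq]
          rw [List.drop_left, List.drop_left]
          rw [ih T (by rw [← hT] at ht; simp at ht; omega)]

theorem scan_rep (p : List Char × List Char) (tbl : List (List Char × List Char))
    (hg : pvGood (p :: tbl) = true) (s : List Char) :
    pvScan tbl (pvRep p.1 p.2 s) = pvScan (p :: tbl) s :=
  scan_rep_aux p tbl hg s.length s le_rfl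

theorem go_eq (k v : List Char) (hk : k ≠ []) :
    ∀ (fuel : Nat) (l acc : List Char), l.length ≤ fuel →
      PySem.Chars.replace.go k v fuel l acc = acc.reverse ++ pvRep k v l := by
  intro fuel
  induction fuel with
  | zero =>
    intro l acc h
    have hl : l = [] := by cases l <;> simp_all
    subst hl
    rw [PySem.Chars.replace.go, pvRep]
  | succ n ihf =>
    intro l acc h
    cases l with
    | nil =>
      rw [PySem.Chars.replace.go, pvRep]
      simp
      omega
    | cons c t =>
      by_cases hp : k.isPrefixOf (c :: t) = true
      · rw [PySem.Chars.replace.go]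
        simp only [hp, if_true]
        cases k with
        | nil => exact absurd rfl hk
        | cons kh kt =>
          have hd : List.drop (kh :: kt).length (c :: t) = t.drop ((kh :: kt).length - 1) := by simp
          rw [hd, ihf _ _ (by simp only [List.length_drop]; simp only [List.length_cons] at h; omega)]
          rw [pvRep, if_pos hp]
          simp
      · rw [PySem.Chars.replace.go]
        simp only [hp]
        rw [ihf t (c :: acc) (by simpa using Nat.le_of_succ_le_succ h)]
        rw [pvRep, if_neg hp]
        simp

theorem replace_eq_rep (k v s : List Char) (hk : k ≠ []) :
    PySem.Chars.replace s k v = pvRep k v s := by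
  rw [PySem.Chars.replace]
  simp only [List.isEmpty_iff, hk, if_false]
  rw [go_eq k v hk s.length s [] le_rfl]
  simp

theorem foldl_replace_eq_scan (tbl : List (List Char × List Char)) (s : List Char)
    (hg : pvGood tbl = true) :
    tbl.foldl (fun c r => PySem.Chars.replace c r.1 r.2) s = pvScan tbl s := by
  induction tbl generalizing s with
  | nil => simp [scan_nil_table]
  | cons p tbl ih =>
    simp only [pvGood, Bool.and_eq_true] at hg
    obtain ⟨wk, hk1, _⟩ := keyShape_shape p.1 hg.1.1.1
    rw [List.foldl_cons, replace_eq_rep p.1 p.2 s (by rw [hk1]; simp), ih _ hg.2]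
    exact scan_rep p tbl (by simp only [pvGood, Bool.and_eq_true]; exact hg) s

theorem foldl_str_toList (l : List (String × String)) (s : String) :
    (l.foldl (fun c r => PySem.Str.replace c r.1 r.2) s).toList
      = (l.map (fun p => (p.1.toList, p.2.toList))).foldl (fun c r => PySem.Chars.replace c r.1 r.2) s.toList := by
  induction l generalizing s with
  | nil => simp
  | cons r l ih =>
    rw [List.foldl_cons, List.map_cons, List.foldl_cons, ih, PySem.Str.toList_replace]

-- ===== VERDICT (by name: the statement is the Claim_ definition above) =====
theorem reemplazar_xsd_spec : Claim_equal_reemplazar_xsd := by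
  intro cadena _
  unfold Spec_reemplazar_xsd reemplazar_xsd_alt
  apply String.toList_inj.mp
  have h1 : reemplazar_xsd cadena = pvTabla.foldl (fun c r => PySem.Str.replace c r.1 r.2) cadena := rfl
  rw [h1, foldl_str_toList]
  have h2 : pvTabla.map (fun p => (p.1.toList, p.2.toList)) = pvCTab := rfl
  rw [h2, foldl_replace_eq_scan _ _ pvGood_pvCTab]
  simp
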